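-- pv_equiv track=rewrite | github.com/hyunmin0317/Algorithm-Study | Python/codility11-1.py | solution
-- ===== SOURCE A (Python) =====
-- def solution(A):
--     N = len(A)
--     ans = [0 for _ in range(N)]
--
--     for i in range(N):
--         num = A[i]
--         for j in range(N):
--             if num % A[j] != 0:
--                 ans[i] += 1
--     return ans
-- ===== SOURCE B (Python) =====
-- def solution(A):
--     # Group by value: the answer for index i depends only on A[i].
--     # Count multiplicities once, then for each DISTINCT value count how many
--     # elements divide it (summing multiplicities), instead of A's full N x N scan.
--     N = len(A)
--     cnt = {}
--     for x in A:
--         cnt[x] = cnt.get(x, 0) + 1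
--     keys = list(cnt)
--     nondiv = {}
--     for v in keys:
--         divs = 0
--         for u in keys:
--             if v % u == 0:
--                 divs += cnt[u]
--         nondiv[v] = N - divs
--     return [nondiv[a] for a in A]
-- ===== Notes on version B (the rewrite author's own statement) =====
-- stated objective: faster
-- what changed: Replaces A's N×N element-vs-element scan by a multiplicity counter plus one divisor scan per distinct value, then answers each index by dictionary lookup.
import Mathlib
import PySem

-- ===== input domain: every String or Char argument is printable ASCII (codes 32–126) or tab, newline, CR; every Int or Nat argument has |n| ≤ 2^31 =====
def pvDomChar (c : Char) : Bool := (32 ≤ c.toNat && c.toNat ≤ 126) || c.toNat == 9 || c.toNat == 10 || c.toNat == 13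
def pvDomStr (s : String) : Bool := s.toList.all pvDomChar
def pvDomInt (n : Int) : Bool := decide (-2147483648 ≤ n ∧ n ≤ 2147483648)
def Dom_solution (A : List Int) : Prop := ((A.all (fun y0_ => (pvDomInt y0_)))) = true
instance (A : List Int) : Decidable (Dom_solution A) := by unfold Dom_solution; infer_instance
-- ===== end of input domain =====

-- B replaces A's N×N element-vs-element scan by a multiplicity counter plus one
-- divisor scan per DISTINCT value (objective: faster on duplicate-heavy input).

-- ===== PORT A =====
-- Python A mutates ans[i] in place; ans[i] is only touched during outer iteration i,
-- so the double loop is ported as a map over the outer range with an inner counting fold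
-- (indices produced by range(N) are always in range, so pyGetD with default 0 is exact).
def solution (A : List Int) : List Int :=
  let N := A.length
  (PySem.List.pyRange 0 (N : Int) 1).map (fun i =>
    let num := PySem.List.pyGetD A i 0
    (PySem.List.pyRange 0 (N : Int) 1).foldl (fun acc j =>
      if PySem.Int.mod num (PySem.List.pyGetD A j 0) ≠ 0 then acc + 1 else acc) 0)

-- ===== PORT B =====
-- 'nondiv[a]' in Source B is looked up only for a ∈ A ⊆ keys, so getD with default 0 is exact.
def solution_alt (A : List Int) : List Int :=
  let N : Int := A.length
  let cnt : PySem.Dict Int Int :=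
    A.foldl (fun d x => d.insert x (d.getD x 0 + 1)) PySem.Dict.empty
  let keys := cnt.keys
  let nondiv : PySem.Dict Int Int :=
    keys.foldl (fun d v =>
      let divs := keys.foldl (fun acc u =>
        if PySem.Int.mod v u = 0 then acc + cnt.getD u 0 else acc) 0
      d.insert v (N - divs)) PySem.Dict.empty
  A.map (fun a => nondiv.getD a 0)

-- ===== PRECONDITION & SPEC =====
-- Pre_ excludes lists containing 0: there A's 'num % A[j]' raises ZeroDivisionError (B raises too).
def Pre_solution (A : List Int) : Prop := (0 : Int) ∉ A
instance (A : List Int) : Decidable (Pre_solution A) := by unfold Pre_solution; infer_instance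
def pvWitness_solution : List Int := [3, -2, 6, 3]

def Spec_solution (A : List Int) (out : List Int) : Prop := out = solution_alt A
instance (A : List Int) (out : List Int) : Decidable (Spec_solution A out) := by unfold Spec_solution; infer_instance

-- ===== CLAIM (what is proved, stated in full; the proofs are below) =====
def Claim_equal_solution : Prop := ∀ (A : List Int), Dom_solution A → Pre_solution A → Spec_solution A (solution A)

-- ===== LEMMAS AND PROOFS =====

-- Both programs compute, for each element num, the count of elements of A not dividing num.
def aCore (A : List Int) : List Int :=
  A.map (fun num => ((A.countP (fun u => decide (¬ PySem.Int.mod num u = 0))) : Int))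

lemma map_pyGetD (A : List Int) (G : Int → Int) :
    A.map G = (PySem.List.pyRange 0 (A.length : Int)).map
      (fun i => G (PySem.List.pyGetD A i 0)) := by
  conv_lhs => rw [← PySem.List.map_pyGetD_pyRange_zero A 0]
  rw [List.map_map]; rfl

lemma countP_pyGetD (A : List Int) (q : Int → Bool) :
    (PySem.List.pyRange 0 (A.length : Int)).countP (fun j => q (PySem.List.pyGetD A j 0))
      = A.countP q := by
  conv_rhs => rw [← PySem.List.map_pyGetD_pyRange_zero A 0]
  rw [List.countP_map]; rfl

lemma solution_eq_core (A : List Int) : solution A = aCore A := by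
  unfold solution aCore
  rw [map_pyGetD A (fun num => ((A.countP (fun u => decide (¬ PySem.Int.mod num u = 0))) : Int))]
  refine List.map_congr_left (fun i _ => ?_)
  rw [PySem.List.foldl_ite_add_one
    (fun j => PySem.Int.mod (PySem.List.pyGetD A i 0) (PySem.List.pyGetD A j 0) ≠ 0),
    zero_add, countP_pyGetD A (fun u => decide (¬ PySem.Int.mod (PySem.List.pyGetD A i 0) u = 0))]

lemma sum_counts_eq_countP (A : List Int) (p : Int → Bool) :
    (((PySem.Set.ofList A).filter p).map (fun u => ((A.count u : Nat) : Int))).sum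
      = ((A.countP p : Nat) : Int) := by
  have hperm : (PySem.Set.ofList A).Perm A.dedup := by
    rw [List.perm_ext_iff_of_nodup (PySem.Set.nodup_ofList A) A.nodup_dedup]
    intro a; rw [PySem.Set.mem_ofList, List.mem_dedup]
  calc (((PySem.Set.ofList A).filter p).map (fun u => ((A.count u : Nat) : Int))).sum
      = (((A.dedup.filter p).map (fun u => ((A.count u : Nat) : Int)))).sum :=
        ((hperm.filter p).map _).sum_eq
    _ = ((A.countP p : Nat) : Int) := by
        rw [← List.sum_map_count_dedup_filter_eq_countP p A]
        push_cast
        rw [List.map_map]; rfl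

lemma solution_alt_eq_core (A : List Int) : solution_alt A = aCore A := by
  unfold solution_alt aCore
  simp only []
  set cnt : PySem.Dict Int Int :=
    A.foldl (fun d x => d.insert x (d.getD x 0 + 1)) PySem.Dict.empty with hcnt
  have hkeys : cnt.keys = PySem.Set.ofList A := by
    rw [hcnt, PySem.Dict.keys_foldl_insert, PySem.Dict.keys_empty, PySem.Set.ofList_eq_foldl]
    rfl
  have hgetD : ∀ u, cnt.getD u 0 = ((A.count u : Nat) : Int) := by
    intro u
    rw [hcnt, PySem.Dict.getD_foldl_insert_add_one, PySem.Dict.getD_empty, zero_add]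
  set divs : Int → Int := fun v => cnt.keys.foldl (fun acc u =>
      if PySem.Int.mod v u = 0 then acc + cnt.getD u 0 else acc) 0 with hdivs
  have hnodupk : cnt.keys.Nodup := by rw [hkeys]; exact PySem.Set.nodup_ofList A
  set nondiv : PySem.Dict Int Int := cnt.keys.foldl (fun d v =>
      d.insert v ((A.length : Int) - divs v)) PySem.Dict.empty with hnd
  have hitems : nondiv.items = cnt.keys.map (fun v => (v, (A.length : Int) - divs v)) := by
    rw [hnd]
    rw [PySem.Dict.items_foldl_insert_fresh cnt.keys (fun v => v)
      (fun v => (A.length : Int) - divs v) PySem.Dict.empty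
      (fun a _ => by simp [PySem.Dict.contains_empty]) (by simpa using hnodupk)]
    simp [PySem.Dict.empty]
  have hndnodup : nondiv.keys.Nodup := by
    rw [hnd]
    exact PySem.Dict.nodup_keys_foldl_insert _ _ _ (by simp [PySem.Dict.keys_empty])
  have hlook : ∀ a ∈ A, nondiv.getD a 0 = (A.length : Int) - divs a := by
    intro a ha
    have hmem : (a, (A.length : Int) - divs a) ∈ nondiv.items := by
      rw [hitems]
      exact List.mem_map_of_mem (by rw [hkeys]; exact (PySem.Set.mem_ofList A a).2 ha)
    exact PySem.Dict.getD_of_mem_items nondiv hmem hndnodup 0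
  have hdval : ∀ a, divs a = ((A.countP (fun u => decide (PySem.Int.mod a u = 0)) : Nat) : Int) := by
    intro a
    rw [hdivs]
    simp only []
    rw [PySem.List.foldl_ite_eq_foldl_filter (fun u => PySem.Int.mod a u = 0)
      (fun acc u => acc + cnt.getD u 0)]
    rw [PySem.List.foldl_add _ (fun u => cnt.getD u 0) 0, zero_add]
    rw [hkeys]
    rw [List.map_congr_left (fun u _ => hgetD u)]
    exact sum_counts_eq_countP A _
  refine List.map_congr_left (fun a ha => ?_)
  rw [hlook a ha, hdval a]
  have hsplit := List.length_eq_countP_add_countP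
    (p := fun u => decide (PySem.Int.mod a u = 0)) (l := A)
  simp only [decide_eq_true_eq, decide_not] at hsplit
  have hneg : A.countP (fun u => decide (¬ PySem.Int.mod a u = 0))
      = A.countP (fun u => ! decide (PySem.Int.mod a u = 0)) := by
    apply List.countP_congr; intro u _; simp
  rw [hneg]
  omega

-- ===== VERDICT (by name: the statement is the Claim_ definition above) =====
theorem solution_spec : Claim_equal_solution := by
  intro A _ _
  unfold Spec_solution
  rw [solution_eq_core, solution_alt_eq_core]
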